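-- pv_equiv track=rewrite | github.com/renatohack/2022.3-python-and-OS | DR2/python-general/q6.py | separa_tupla
-- ===== SOURCE A (Python) =====
-- def separa_tupla(tupla):
--
--     lista_impares = []
--     tupla_posicoes_pares = ()
--
--     for i in range(len(tupla)):
--         if i % 2 == 0:
--             tupla_posicoes_pares += (tupla[i],)
--         if tupla[i] % 2 == 1:
--             lista_impares.append(tupla[i])
--
--     return lista_impares, tupla_posicoes_pares
-- ===== SOURCE B (Python) =====
-- def separa_tupla(tupla):
--     lista_impares = [x for x in tupla if x % 2 == 1]
--     tupla_posicoes_pares = tuple(tupla[::2])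
--     return lista_impares, tupla_posicoes_pares
-- ===== Notes on version B (the rewrite author's own statement) =====
-- stated objective: idiomatic
-- what changed: The single indexed loop maintaining two accumulators (rebuilding the tuple with += each step) is replaced by two independent index-free passes: a stride slice tupla[::2] for the even-index tuple and a filter comprehension for the odd values.
import Mathlib
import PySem

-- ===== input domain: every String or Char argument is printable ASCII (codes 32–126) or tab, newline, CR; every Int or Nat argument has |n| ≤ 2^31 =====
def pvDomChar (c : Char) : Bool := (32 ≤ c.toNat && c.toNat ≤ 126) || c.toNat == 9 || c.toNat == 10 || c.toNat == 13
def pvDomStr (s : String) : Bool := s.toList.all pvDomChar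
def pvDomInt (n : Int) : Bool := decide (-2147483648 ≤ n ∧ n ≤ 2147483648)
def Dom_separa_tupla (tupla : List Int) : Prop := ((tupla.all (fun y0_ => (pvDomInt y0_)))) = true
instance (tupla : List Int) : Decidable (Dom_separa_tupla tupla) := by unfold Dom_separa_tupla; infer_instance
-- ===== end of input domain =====

-- B replaces A's single indexed loop (which rebuilds the tuple with += each step) by two
-- index-free passes: a stride slice tupla[::2] and a filter comprehension (objective: idiomatic).

-- ===== PORT A =====
-- for i in range(len(tupla)): two accumulators (lista_impares, tupla_posicoes_pares)
def separa_tupla (tupla : List Int) : List Int × List Int :=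
  (PySem.List.pyRange 0 (PySem.List.len tupla) 1).foldl
    (fun st i =>
      let st := if PySem.Int.mod i 2 = 0
                then (st.1, st.2 ++ [PySem.List.pyGetD tupla i 0]) else st
      if PySem.Int.mod (PySem.List.pyGetD tupla i 0) 2 = 1
      then (st.1 ++ [PySem.List.pyGetD tupla i 0], st.2) else st)
    ([], [])

-- ===== PORT B =====
def separa_tupla_alt (tupla : List Int) : List Int × List Int :=
  (tupla.filter (fun x => decide (PySem.Int.mod x 2 = 1)),
   (PySem.List.slice? tupla none none 2).getD [])

-- ===== PRECONDITION & SPEC =====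
def Spec_separa_tupla (tupla : List Int) (out : List Int × List Int) : Prop := out = separa_tupla_alt tupla
instance (tupla : List Int) (out : List Int × List Int) : Decidable (Spec_separa_tupla tupla out) := by unfold Spec_separa_tupla; infer_instance

-- ===== CLAIM (what is proved, stated in full; the proofs are below) =====
def Claim_equal_separa_tupla : Prop := ∀ (tupla : List Int), Dom_separa_tupla tupla → Spec_separa_tupla tupla (separa_tupla tupla)

-- ===== LEMMAS AND PROOFS =====

-- every second element (the even indices) of a list — proof-side characterisation of tupla[::2]
def evenIdx : List Int → List Int
  | [] => []
  | [a] => [a]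
  | a :: _ :: t => a :: evenIdx t

theorem evenIdx_append_singleton (l : List Int) (x : Int) :
    evenIdx (l ++ [x]) = evenIdx l ++ (if l.length % 2 = 0 then [x] else []) := by
  induction l using evenIdx.induct with
  | case1 => simp [evenIdx]
  | case2 a => simp [evenIdx]
  | case3 a b t ih =>
      simp only [List.cons_append, evenIdx, ih, List.length_cons]
      have hiff : (t.length + 1 + 1) % 2 = 0 ↔ t.length % 2 = 0 := by omega
      simp [hiff]

theorem filterMap_evenIdx (xs : List Int) :
    (List.range ((xs.length + 1) / 2)).filterMap (fun k => xs[2 * k]?) = evenIdx xs := by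
  induction xs using evenIdx.induct with
  | case1 => simp [evenIdx]
  | case2 a => simp [evenIdx]
  | case3 a b t ih =>
      have hc : ((a :: b :: t).length + 1) / 2 = (t.length + 1) / 2 + 1 := by
        simp only [List.length_cons]; omega
      rw [hc, List.range_succ_eq_map, List.filterMap_cons, List.filterMap_map]
      have hstep : ((fun k => (a :: b :: t)[2 * k]?) ∘ Nat.succ) = (fun k : Nat => t[2 * k]?) := by
        funext k
        have h1 : 2 * k.succ = 2 * k + 1 + 1 := by omega
        simp [Function.comp, h1]
      rw [hstep, ih]
      simp [evenIdx]

theorem slice?_step_two (xs : List Int) :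
    PySem.List.slice? xs none none 2 = some (evenIdx xs) := by
  rw [show PySem.List.slice? xs none none 2 =
      some (List.filterMap (fun k : Nat => xs[((0:Int) + 2 * (k:Int)).toNat]?)
        (List.range (if 0 < (xs.length:Int) then (((xs.length:Int) - 0 + 2 - 1)/2).toNat else 0)))
      from rfl]
  have hcount : (if 0 < (xs.length:Int) then (((xs.length:Int) - 0 + 2 - 1)/2).toNat else 0)
      = (xs.length + 1) / 2 := by split <;> omega
  have hfun : (fun k : Nat => xs[((0:Int) + 2 * (k:Int)).toNat]?) = (fun k : Nat => xs[2 * k]?) := by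
    funext k
    have : ((0:Int) + 2 * (k:Int)).toNat = 2 * k := by omega
    rw [this]
  rw [hcount, hfun, filterMap_evenIdx]

theorem mod_two_emod (x : Int) : PySem.Int.mod x 2 = x % 2 := by
  unfold PySem.Int.mod; rw [Int.fmod_eq_emod]; simp

theorem mod_natCast_two (m : Nat) : PySem.Int.mod ((m:Nat):Int) 2 = ((m % 2 : Nat) : Int) := by
  unfold PySem.Int.mod; rw [Int.fmod_eq_emod]; simp

theorem fold_invariant (xs : List Int) :
    ∀ n : Nat, n ≤ xs.length →
      (PySem.List.pyRange 0 (n : Int) 1).foldl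
        (fun (st : List Int × List Int) i =>
          let st := if PySem.Int.mod i 2 = 0
                    then (st.1, st.2 ++ [PySem.List.pyGetD xs i 0]) else st
          if PySem.Int.mod (PySem.List.pyGetD xs i 0) 2 = 1
          then (st.1 ++ [PySem.List.pyGetD xs i 0], st.2) else st)
        ([], []) =
      ((xs.take n).filter (fun x => decide (PySem.Int.mod x 2 = 1)), evenIdx (xs.take n)) := by
  intro n hn
  induction n with
  | zero => simp [PySem.List.pyRange_one_eq_nil, evenIdx]
  | succ m ih =>
      have hm : m ≤ xs.length := by omega
      have hmlt : m < xs.length := by omega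
      have hsplit : PySem.List.pyRange 0 ((m : Int) + 1) 1 =
          PySem.List.pyRange 0 (m : Int) 1 ++ [(m : Int)] := by
        exact PySem.List.pyRange_one_succ_right (by positivity)
      have hcast : ((m + 1 : Nat) : Int) = (m : Int) + 1 := by push_cast; ring
      rw [hcast, hsplit, List.foldl_append, ih hm]
      have hget : PySem.List.pyGetD xs ((m : Nat) : Int) 0 = xs[m] := by
        rw [PySem.List.pyGetD_natCast]
        exact List.getD_eq_getElem xs 0 hmlt
      have htake : xs.take (m + 1) = xs.take m ++ [xs[m]] := by
        rw [List.take_add_one]; simp [List.getElem?_eq_getElem hmlt]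
      have hlen : (xs.take m).length = m := List.length_take_of_le hm
      rw [htake, List.filter_append, evenIdx_append_singleton, hlen]
      simp only [List.foldl_cons, List.foldl_nil, hget, mod_natCast_two m]
      by_cases hpar : m % 2 = 0
      · simp only [hpar, Nat.cast_zero, if_pos trivial]
        split <;> rename_i h <;> rw [mod_two_emod] at h <;> simp [h]
      · have h2 : ¬ (((m % 2 : Nat) : Int) = 0) := by omega
        simp only [if_neg h2, if_neg hpar]
        split <;> rename_i h <;> rw [mod_two_emod] at h <;> simp [h]

-- ===== VERDICT (by name: the statement is the Claim_ definition above) =====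
theorem separa_tupla_spec : Claim_equal_separa_tupla := by
  intro tupla _
  unfold Spec_separa_tupla separa_tupla separa_tupla_alt
  rw [slice?_step_two]
  have h := fold_invariant tupla tupla.length (le_refl _)
  simp only [List.take_length] at h
  simpa [PySem.List.len] using h
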